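-- pv_equiv track=rewrite | github.com/compilepeace/2048-GAME | src/logics.py | __compressLeft
-- ===== SOURCE A (Python) =====
-- def __compressLeft(board):
-- 	# Create a new matrix to store left compressed board
-- 	new_matrix       = [[0 for j in range(4)] for i in range(4)]
-- 	CHANGED_FLAG = False
--
-- 	for r in range(4):
-- 		pos = 0
-- 		# Store all values (not 0) into the new_matrix (remaining places are already 0)
-- 		for c in range(4):
-- 			if board[r][c] != 0:
-- 				new_matrix[r][pos] = board[r][c]
-- 				if pos != c:
-- 					CHANGED_FLAG = True		# compression is done only when pos != c
-- 				pos += 1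
--
-- 	return new_matrix, CHANGED_FLAG
-- ===== SOURCE B (Python) =====
-- def __compressLeft(board):
--     # Stable sort each row by "is zero": zeros sink to the right, nonzeros keep
--     # their relative order -- that IS left-compression.  Changed flag = whole
--     # sorted grid differs from the input window.
--     rows = [[board[r][c] for c in range(4)] for r in range(4)]
--     new_matrix = [sorted(row, key=lambda v: v == 0) for row in rows]
--     return new_matrix, new_matrix != rows
-- ===== Notes on version B (the rewrite author's own statement) =====
-- stated objective: idiomatic
-- what changed: B compresses each row by a stable sort keyed on 'is zero' (zeros sink right, nonzeros keep order) and derives the changed flag by a whole-grid comparison of the sorted matrix with the input window, replacing A's write-cursor insertion into a pre-zeroed matrix with per-element pos != c flag bookkeeping.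
import Mathlib
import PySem

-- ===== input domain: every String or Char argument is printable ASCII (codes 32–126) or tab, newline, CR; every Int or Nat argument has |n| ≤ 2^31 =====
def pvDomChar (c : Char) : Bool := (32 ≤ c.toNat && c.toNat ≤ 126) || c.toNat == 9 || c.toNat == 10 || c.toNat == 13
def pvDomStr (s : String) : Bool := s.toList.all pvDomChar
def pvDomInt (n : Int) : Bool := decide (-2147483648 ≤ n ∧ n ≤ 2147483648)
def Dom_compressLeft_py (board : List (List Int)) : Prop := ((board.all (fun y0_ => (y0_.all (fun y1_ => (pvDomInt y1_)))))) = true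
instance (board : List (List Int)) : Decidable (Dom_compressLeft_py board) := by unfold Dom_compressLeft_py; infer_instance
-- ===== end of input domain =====

-- B compresses each row by a stable sort keyed on 'is zero' and derives the changed flag by
-- comparing the sorted grid with the input window, instead of A's write-cursor bookkeeping.

-- ===== PORT A =====
-- board[r][c] (Python raises IndexError outside Pre_; .getD 0 is unreachable inside Pre_)
def pvGetA (board : List (List Int)) (r c : Int) : Int :=
  ((PySem.List.pyGet? board r).bind (fun row => PySem.List.pyGet? row c)).getD 0

-- new_matrix[r][pos] = v  (list assignment; indices in range inside Pre_)
def pvSetA (nm : List (List Int)) (r pos : Nat) (v : Int) : List (List Int) :=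
  nm.set r ((nm.getD r []).set pos v)

-- the body of 'for c in range(4)' for a fixed r; state = (new_matrix, CHANGED_FLAG, pos)
def innerA (board : List (List Int)) (r : Int)
    (st : List (List Int) × Bool) : List (List Int) × Bool :=
  let t := (PySem.List.pyRange 0 4 1).foldl
    (fun (s : List (List Int) × Bool × Int) (c : Int) =>
      if pvGetA board r c ≠ 0 then
        (pvSetA s.1 r.toNat s.2.2.toNat (pvGetA board r c),
         (if s.2.2 ≠ c then true else s.2.1),
         s.2.2 + 1)
      else s)
    (st.1, st.2, (0 : Int))
  (t.1, t.2.1)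

def compressLeft_py (board : List (List Int)) : List (List Int) × Bool :=
  (PySem.List.pyRange 0 4 1).foldl (fun st r => innerA board r st)
    (List.replicate 4 (List.replicate 4 (0 : Int)), false)

-- ===== PORT B =====
-- sorted(row, key=lambda v: v == 0): stable, zeros sink right
def sortRowB (row : List Int) : List Int :=
  PySem.List.sorted row (fun v => decide (v = 0)) false

-- board[r][c] (raises IndexError outside Pre_; .getD 0 is unreachable inside Pre_)
def pvGetB (board : List (List Int)) (r c : Int) : Int :=
  ((PySem.List.pyGet? board r).bind (fun row => PySem.List.pyGet? row c)).getD 0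

def compressLeft_py_alt (board : List (List Int)) : List (List Int) × Bool :=
  let rows := (PySem.List.pyRange 0 4 1).map
    (fun r => (PySem.List.pyRange 0 4 1).map (fun c => pvGetB board r c))
  let newMatrix := rows.map sortRowB
  (newMatrix, decide (newMatrix ≠ rows))

-- ===== PRECONDITION & SPEC =====
-- Pre_ excludes exactly the boards on which A raises IndexError (fewer than 4 rows,
-- or one of the first 4 rows shorter than 4).
def Pre_compressLeft_py (board : List (List Int)) : Prop :=
  4 ≤ board.length ∧ ∀ row ∈ board.take 4, 4 ≤ row.length
instance (board : List (List Int)) : Decidable (Pre_compressLeft_py board) := by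
  unfold Pre_compressLeft_py; infer_instance

def pvWitness_compressLeft_py : List (List Int) :=
  [[0, 2, 0, 2], [4, 0, 0, 0], [0, 0, 0, 0], [2, 2, 2, 2]]

def Spec_compressLeft_py (board : List (List Int)) (out : List (List Int) × Bool) : Prop := out = compressLeft_py_alt board
instance (board : List (List Int)) (out : List (List Int) × Bool) : Decidable (Spec_compressLeft_py board out) := by unfold Spec_compressLeft_py; infer_instance

-- ===== CLAIM (what is proved, stated in full; the proofs are below) =====
def Claim_equal_compressLeft_py : Prop := ∀ (board : List (List Int)), Dom_compressLeft_py board → Pre_compressLeft_py board → Spec_compressLeft_py board (compressLeft_py board)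


-- ===== LEMMAS AND PROOFS =====

-- what A's inner loop produces for a row: nonzeros in order, zero-padded to 4
def compressRowA (row : List Int) : List Int :=
  let nz := row.filter (fun v => v ≠ 0)
  nz ++ List.replicate (4 - nz.length) 0

-- the stable sort by 'is zero' of a 4-element row is exactly filter-nonzero-then-pad
theorem sortRowB_eq (a b c d : Int) :
    sortRowB [a, b, c, d] = compressRowA [a, b, c, d] := by
  by_cases e0 : a = 0 <;> by_cases e1 : b = 0 <;> by_cases e2 : c = 0 <;> by_cases e3 : d = 0 <;>
    simp [sortRowB, compressRowA, PySem.List.sorted_eq_foldl_insertBy, PySem.List.insertBy,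
          e0, e1, e2, e3, Bool.lt_iff, List.replicate]

-- A's inner loop on a row x0..x3 writes compressRowA of the row into slot r and
-- or-s the per-row changed flag onto fl.
theorem innerA_eval (board : List (List Int)) (r : Int) (_hr : 0 ≤ r)
    (x0 x1 x2 x3 : Int) (rest : List Int)
    (hrow : PySem.List.pyGet? board r = some (x0 :: x1 :: x2 :: x3 :: rest))
    (nm : List (List Int)) (fl : Bool)
    (hnm : nm.getD r.toNat [] = [0, 0, 0, 0]) (hlen : r.toNat < nm.length) :
    innerA board r (nm, fl) =
      (nm.set r.toNat (compressRowA [x0, x1, x2, x3]),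
       fl || decide (compressRowA [x0, x1, x2, x3] ≠ [x0, x1, x2, x3])) := by
  have hR : PySem.List.pyRange 0 4 1 = [0, 1, 2, 3] := by decide
  have hg : ∀ (c : Nat), c < 4 → pvGetA board r (c : Int) = [x0, x1, x2, x3].getD c 0 := by
    intro c hc
    rw [pvGetA, hrow, Option.bind_some, PySem.List.pyGet?_natCast]
    interval_cases c <;> simp
  have h0 : pvGetA board r 0 = x0 := by simpa using hg 0 (by norm_num)
  have h1 : pvGetA board r 1 = x1 := by simpa using hg 1 (by norm_num)
  have h2 : pvGetA board r 2 = x2 := by simpa using hg 2 (by norm_num)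
  have h3 : pvGetA board r 3 = x3 := by simpa using hg 3 (by norm_num)
  simp only [List.getD_eq_getElem?_getD, List.getElem?_eq_getElem hlen] at hnm
  simp only [Option.getD_some] at hnm
  by_cases e0 : x0 = 0 <;> by_cases e1 : x1 = 0 <;> by_cases e2 : x2 = 0 <;> by_cases e3 : x3 = 0 <;>
    simp [innerA, hR, h0, h1, h2, h3, e0, e1, e2, e3, pvSetA, compressRowA,
          List.getD_eq_getElem?_getD, hlen, List.set_set, hnm]
  rw [← hnm]
  exact (List.set_getElem_self hlen).symm

-- any list of length ≥ 4 starts with four elements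
theorem exists4 {α : Type} (l : List α) (h : 4 ≤ l.length) :
    ∃ a b c d r, l = a :: b :: c :: d :: r := by
  rcases l with _ | ⟨a, l⟩; · simp at h
  rcases l with _ | ⟨b, l⟩; · simp at h
  rcases l with _ | ⟨c, l⟩; · simp at h
  rcases l with _ | ⟨d, l⟩; · simp at h
  exact ⟨a, b, c, d, l, rfl⟩

-- one row of B's 4x4 window, evaluated on a row with four known heads
theorem pvGetB_eval (board : List (List Int)) (r : Int)
    (x0 x1 x2 x3 : Int) (rest : List Int)
    (hrow : PySem.List.pyGet? board r = some (x0 :: x1 :: x2 :: x3 :: rest)) :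
    [pvGetB board r 0, pvGetB board r 1, pvGetB board r 2, pvGetB board r 3] = [x0, x1, x2, x3] := by
  have hg : ∀ (c : Nat), c < 4 → pvGetB board r (c : Int) = [x0, x1, x2, x3].getD c 0 := by
    intro c hc
    rw [pvGetB, hrow, Option.bind_some, PySem.List.pyGet?_natCast]
    interval_cases c <;> simp
  rw [show pvGetB board r 0 = x0 by simpa using hg 0 (by norm_num),
      show pvGetB board r 1 = x1 by simpa using hg 1 (by norm_num),
      show pvGetB board r 2 = x2 by simpa using hg 2 (by norm_num),
      show pvGetB board r 3 = x3 by simpa using hg 3 (by norm_num)]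

-- inequality of two 4-row matrices is the OR of the row inequalities
theorem neq4 (a0 a1 a2 a3 b0 b1 b2 b3 : List Int) :
    decide (([a0, a1, a2, a3] : List (List Int)) ≠ [b0, b1, b2, b3]) =
      (((decide (a0 ≠ b0) || decide (a1 ≠ b1)) || decide (a2 ≠ b2)) || decide (a3 ≠ b3)) := by
  by_cases h0 : a0 = b0 <;> by_cases h1 : a1 = b1 <;>
    by_cases h2 : a2 = b2 <;> by_cases h3 : a3 = b3 <;> simp [h0, h1, h2, h3]

-- ===== VERDICT =====
set_option maxHeartbeats 1600000 in
theorem compressLeft_py_spec : Claim_equal_compressLeft_py := by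
  intro board _ hpre
  obtain ⟨hblen, hrows⟩ := hpre
  obtain ⟨t0, t1, t2, t3, brest, rfl⟩ := exists4 board hblen
  obtain ⟨x00, x01, x02, x03, r0, rfl⟩ := exists4 t0 (hrows t0 (by simp))
  obtain ⟨x10, x11, x12, x13, r1, rfl⟩ := exists4 t1 (hrows t1 (by simp))
  obtain ⟨x20, x21, x22, x23, r2, rfl⟩ := exists4 t2 (hrows t2 (by simp))
  obtain ⟨x30, x31, x32, x33, r3, rfl⟩ := exists4 t3 (hrows t3 (by simp))
  have hR : PySem.List.pyRange 0 4 1 = [0, 1, 2, 3] := by decide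
  have e0 := PySem.List.pyGet?_zero_cons (x00 :: x01 :: x02 :: x03 :: r0)
    ((x10 :: x11 :: x12 :: x13 :: r1) :: (x20 :: x21 :: x22 :: x23 :: r2) ::
      (x30 :: x31 :: x32 :: x33 :: r3) :: brest)
  show compressLeft_py _ = compressLeft_py_alt _
  rw [compressLeft_py, hR]
  simp only [List.foldl_cons, List.foldl_nil]
  rw [innerA_eval _ 0 (by norm_num) _ _ _ _ _ e0 _ _ (by decide) (by decide)]
  have e1 : PySem.List.pyGet?
      ((x00 :: x01 :: x02 :: x03 :: r0) :: (x10 :: x11 :: x12 :: x13 :: r1) ::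
        (x20 :: x21 :: x22 :: x23 :: r2) :: (x30 :: x31 :: x32 :: x33 :: r3) :: brest) 1 =
      some (x10 :: x11 :: x12 :: x13 :: r1) := by
    rw [show (1 : Int) = ((1 : Nat) : Int) from rfl, PySem.List.pyGet?_natCast]; rfl
  have e2 : PySem.List.pyGet?
      ((x00 :: x01 :: x02 :: x03 :: r0) :: (x10 :: x11 :: x12 :: x13 :: r1) ::
        (x20 :: x21 :: x22 :: x23 :: r2) :: (x30 :: x31 :: x32 :: x33 :: r3) :: brest) 2 =
      some (x20 :: x21 :: x22 :: x23 :: r2) := by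
    rw [show (2 : Int) = ((2 : Nat) : Int) from rfl, PySem.List.pyGet?_natCast]; rfl
  have e3 : PySem.List.pyGet?
      ((x00 :: x01 :: x02 :: x03 :: r0) :: (x10 :: x11 :: x12 :: x13 :: r1) ::
        (x20 :: x21 :: x22 :: x23 :: r2) :: (x30 :: x31 :: x32 :: x33 :: r3) :: brest) 3 =
      some (x30 :: x31 :: x32 :: x33 :: r3) := by
    rw [show (3 : Int) = ((3 : Nat) : Int) from rfl, PySem.List.pyGet?_natCast]; rfl
  rw [innerA_eval _ 1 (by norm_num) _ _ _ _ _ e1 _ _ (by simp) (by simp)]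
  rw [innerA_eval _ 2 (by norm_num) _ _ _ _ _ e2 _ _ (by simp) (by simp)]
  rw [innerA_eval _ 3 (by norm_num) _ _ _ _ _ e3 _ _ (by simp) (by simp)]
  simp only [compressLeft_py_alt, hR]
  simp only [List.map_cons, List.map_nil]
  simp only [pvGetB_eval _ 0 _ _ _ _ _ e0, pvGetB_eval _ 1 _ _ _ _ _ e1,
      pvGetB_eval _ 2 _ _ _ _ _ e2, pvGetB_eval _ 3 _ _ _ _ _ e3]
  simp only [sortRowB_eq]
  rw [neq4]
  simp [List.replicate, Bool.or_assoc]
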